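-- pv_equiv track=rewrite | github.com/Zeydel/Everybody-Codes | The Kingdom of Algorithmia/Quest07/Quest07_part2.py | get_total_essence
-- ===== SOURCE A (Python) =====
-- def get_total_essence(name, sequence, racetrack, rounds):
--
--     # Init var for total essence
--     total_essence = 0
--
--     # Starting power
--     power = 10
--
--     # For every round
--     for i in range(rounds * len(racetrack)):
--
--         racetrack_action = racetrack[i % len(racetrack)]
--
--         # Find out the current action
--         action = sequence[i % len(sequence)]
--
--         # Increment or decrement power
--         if racetrack_action == '+':
--             power += 1
--         elif racetrack_action == '-':
--             power -= 1
--         elif action == '+':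
--             power += 1
--         elif action == '-':
--             power -= 1
--
--         # Power cannot be negative
--         if power < 0:
--             power = 0
--
--         # Add the current power to the essence
--         total_essence += power
--
--     # Return the total
--     return total_essence
-- ===== SOURCE B (Python) =====
-- def get_total_essence(name, sequence, racetrack, rounds):
--     lr = len(racetrack)
--     ls = len(sequence)
--     n = rounds * lr
--     if n <= 0:
--         return 0
--     # smallest common period L of the two cyclic strings (lcm, found by scanning multiples)
--     L = lr * ls
--     for k in range(1, ls + 1):
--         if (lr * k) % ls == 0:
--             L = lr * k
--             break
--     # per-step power deltas of one period
--     deltas = []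
--     for i in range(L):
--         cr = racetrack[i % lr]
--         cs = sequence[i % ls]
--         if cr == '+':
--             deltas.append(1)
--         elif cr == '-':
--             deltas.append(-1)
--         elif cs == '+':
--             deltas.append(1)
--         elif cs == '-':
--             deltas.append(-1)
--         else:
--             deltas.append(0)
--     # net change per period, essence of one clamp-free period started at power 0,
--     # and the lowest running prefix sum (clamp fires in a period started at power p iff p + minpref < 0)
--     net = 0
--     K = 0
--     minpref = 0
--     for d in deltas:
--         net += d
--         K += net
--         if net < minpref:
--             minpref = net
--     full, rem = divmod(n, L)
--     total = 0
--     power = 10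
--     remaining = full
--     while remaining > 0:
--         if power + minpref >= 0 and net >= 0:
--             # clamp can never fire again: closed form over all remaining periods
--             total += remaining * (L * power + K) + L * net * (remaining * (remaining - 1) // 2)
--             power += net * remaining
--             remaining = 0
--         else:
--             t = 0
--             p = power
--             for d in deltas:
--                 p += d
--                 if p < 0:
--                     p = 0
--                 t += p
--             if p == power:
--                 # boundary power is a fixed point: every remaining period is identical
--                 total += remaining * t
--                 remaining = 0
--             else:
--                 total += t
--                 power = p
--                 remaining -= 1
--     for d in deltas[:rem]:
--         power += d
--         if power < 0:
--             power = 0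
--         total += power
--     return total
-- ===== Notes on version B (the rewrite author's own statement) =====
-- stated objective: faster
-- what changed: B simulates at most one lcm-period table plus a short transient: it precomputes per-period net change, clamp-free essence K and minimum prefix sum, then jumps over all remaining full periods at once with an arithmetic-series closed form once the clamp is provably inactive (power+minpref>=0, net>=0) or with a fixed point of the boundary power, instead of A's step-by-step loop over rounds*len(racetrack) iterations.
import Mathlib
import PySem

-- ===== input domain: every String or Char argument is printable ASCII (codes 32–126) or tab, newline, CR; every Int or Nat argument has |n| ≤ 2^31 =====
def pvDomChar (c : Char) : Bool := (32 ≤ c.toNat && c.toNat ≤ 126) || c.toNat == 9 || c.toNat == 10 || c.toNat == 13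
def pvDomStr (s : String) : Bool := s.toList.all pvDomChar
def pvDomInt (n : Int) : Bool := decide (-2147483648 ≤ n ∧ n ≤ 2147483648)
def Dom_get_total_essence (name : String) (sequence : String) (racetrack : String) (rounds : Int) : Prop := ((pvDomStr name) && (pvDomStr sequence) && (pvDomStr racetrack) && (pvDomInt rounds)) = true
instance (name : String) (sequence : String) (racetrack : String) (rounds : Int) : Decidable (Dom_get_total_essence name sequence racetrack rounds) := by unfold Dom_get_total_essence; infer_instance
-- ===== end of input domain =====

-- B skips almost all of A's iterations: it analyses one common period of the two cyclic strings and
-- jumps over the remaining full periods with a closed form (clamp provably inactive) or a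
-- fixed-point of the boundary power (objective: faster, asymptotic).

-- ===== PORT A =====
-- A's loop body: index both strings cyclically, adjust power by the branch chain, clamp at 0, accumulate.
-- pyGetD's default is unreachable under Pre_ (the index i % len is then always in range).
def get_total_essence (name : String) (sequence : String) (racetrack : String) (rounds : Int) : Int :=
  let st :=
    (PySem.List.pyRange 0 (rounds * PySem.Str.len racetrack) 1).foldl
      (fun (st : Int × Int) (i : Int) =>
        let racetrack_action :=
          PySem.List.pyGetD racetrack.toList (PySem.Int.mod i (PySem.Str.len racetrack)) ' '
        let action :=
          PySem.List.pyGetD sequence.toList (PySem.Int.mod i (PySem.Str.len sequence)) ' '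
        let power :=
          if racetrack_action = '+' then st.2 + 1
          else if racetrack_action = '-' then st.2 - 1
          else if action = '+' then st.2 + 1
          else if action = '-' then st.2 - 1
          else st.2
        let power := if power < 0 then 0 else power
        (st.1 + power, power))
      (0, 10)
  st.1

-- ===== PORT B =====
-- Source B's inner 'for d in deltas' period simulation (state = (t, p), started at (0, power))
def pvPeriodRun (deltas : List Int) (power : Int) : Int × Int :=
  deltas.foldl
    (fun (st : Int × Int) d =>
      let p := st.2 + d
      let p := if p < 0 then 0 else p
      (st.1 + p, p))
    (0, power)

-- Source B's 'while remaining > 0' loop (state = (total, power))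
def pvLoop (deltas : List Int) (L net K minpref : Int) (remaining total power : Int) : Int × Int :=
  if h : 0 < remaining then
    if 0 ≤ power + minpref ∧ 0 ≤ net then
      (total + remaining * (L * power + K)
         + L * net * PySem.Int.floordiv (remaining * (remaining - 1)) 2,
       power + net * remaining)
    else
      let tp := pvPeriodRun deltas power
      if tp.2 = power then (total + remaining * tp.1, tp.2)
      else pvLoop deltas L net K minpref (remaining - 1) (total + tp.1) tp.2
  else (total, power)
termination_by remaining.toNat
decreasing_by omega

def get_total_essence_alt (name : String) (sequence : String) (racetrack : String) (rounds : Int) : Int :=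
  let lr : Int := PySem.Str.len racetrack
  let ls : Int := PySem.Str.len sequence
  let n : Int := rounds * lr
  if n ≤ 0 then 0
  else
    -- 'L = lr*ls; for k in range(1, ls+1): if (lr*k) % ls == 0: L = lr*k; break'
    let L : Int :=
      (((PySem.List.pyRange 1 (ls + 1) 1).find?
          (fun k => PySem.Int.mod (lr * k) ls == 0)).map (fun k => lr * k)).getD (lr * ls)
    -- 'deltas = []; for i in range(L): … deltas.append(…)'
    let deltas : List Int :=
      (PySem.List.pyRange 0 L 1).foldl
        (fun acc i =>
          let cr := PySem.List.pyGetD racetrack.toList (PySem.Int.mod i lr) ' '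
          let cs := PySem.List.pyGetD sequence.toList (PySem.Int.mod i ls) ' '
          acc ++ [if cr = '+' then 1
                  else if cr = '-' then -1
                  else if cs = '+' then 1
                  else if cs = '-' then (-1 : Int) else 0])
        []
    -- 'net = 0; K = 0; minpref = 0; for d in deltas: …'
    let nkm : Int × Int × Int :=
      deltas.foldl
        (fun (st : Int × Int × Int) d =>
          let net := st.1 + d
          let K := st.2.1 + net
          let minpref := if net < st.2.2 then net else st.2.2
          (net, K, minpref))
        (0, 0, 0)
    let full := PySem.Int.floordiv n L
    let rem := PySem.Int.mod n L
    let tp := pvLoop deltas L nkm.1 nkm.2.1 nkm.2.2 full 0 10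
    -- 'for d in deltas[:rem]: …'
    let st :=
      (PySem.List.slice deltas none (some rem)).foldl
        (fun (st : Int × Int) d =>
          let p := st.2 + d
          let p := if p < 0 then 0 else p
          (st.1 + p, p))
        tp
    st.1

-- ===== PRECONDITION & SPEC =====
-- Pre_ excludes exactly the inputs on which A raises ZeroDivisionError: an empty sequence while the
-- loop runs at least once (rounds > 0 and racetrack nonempty); A returns on every other input.
def Pre_get_total_essence (name : String) (sequence : String) (racetrack : String) (rounds : Int) : Prop :=
  sequence ≠ "" ∨ rounds ≤ 0 ∨ racetrack = ""
instance (name : String) (sequence : String) (racetrack : String) (rounds : Int) : Decidable (Pre_get_total_essence name sequence racetrack rounds) := by unfold Pre_get_total_essence; infer_instance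
def pvWitness_get_total_essence : String × String × String × Int := ("x", "+-", "+-=", 2)

def Spec_get_total_essence (name : String) (sequence : String) (racetrack : String) (rounds : Int) (out : Int) : Prop := out = get_total_essence_alt name sequence racetrack rounds
instance (name : String) (sequence : String) (racetrack : String) (rounds : Int) (out : Int) : Decidable (Spec_get_total_essence name sequence racetrack rounds out) := by unfold Spec_get_total_essence; infer_instance

-- ===== CLAIM (what is proved, stated in full; the proofs are below) =====
def Claim_equal_get_total_essence : Prop := ∀ (name : String) (sequence : String) (racetrack : String) (rounds : Int), Dom_get_total_essence name sequence racetrack rounds → Pre_get_total_essence name sequence racetrack rounds → Spec_get_total_essence name sequence racetrack rounds (get_total_essence name sequence racetrack rounds)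

-- ===== LEMMAS AND PROOFS =====

-- the clamped-accumulate step both programs iterate (state = (total, power))
def pvStep (st : Int × Int) (d : Int) : Int × Int :=
  (st.1 + (if st.2 + d < 0 then 0 else st.2 + d), if st.2 + d < 0 then 0 else st.2 + d)

-- the per-index delta both programs compute
def pvDelta (cr : Char) (cs : Char) : Int :=
  if cr = '+' then 1
  else if cr = '-' then -1
  else if cs = '+' then 1
  else if cs = '-' then -1
  else 0

def pvDI (R S : List Char) (lr ls : Int) (i : Int) : Int :=
  pvDelta (PySem.List.pyGetD R (PySem.Int.mod i lr) ' ')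
          (PySem.List.pyGetD S (PySem.Int.mod i ls) ' ')

-- essence of a clamp-free run started at power p
def pvE (p : Int) : List Int → Int
  | [] => 0
  | d :: ds => (p + d) + pvE (p + d) ds

-- triangular number as the recursion the induction needs
def pvTri : Nat → Int
  | 0 => 0
  | m + 1 => pvTri m + m

-- Source B's (net, K, minpref) accumulator step
def pvTrip (st : Int × Int × Int) (d : Int) : Int × Int × Int :=
  (st.1 + d, st.2.1 + (st.1 + d), if st.1 + d < st.2.2 then st.1 + d else st.2.2)

-- A is the fold of pvStep over the per-index deltas (A's branch chain = add the delta, then clamp)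
theorem pvA_eq (name sequence racetrack : String) (rounds : Int) :
    get_total_essence name sequence racetrack rounds =
    ((PySem.List.pyRange 0 (rounds * PySem.Str.len racetrack) 1).foldl
      (fun st i => pvStep st
        (pvDI racetrack.toList sequence.toList (PySem.Str.len racetrack) (PySem.Str.len sequence) i))
      ((0 : Int), (10 : Int))).1 := by
  simp only [get_total_essence]
  congr 1
  apply List.foldl_ext
  intro st i _
  simp only [pvStep, pvDI, pvDelta]
  split_ifs <;> simp <;> omega

theorem pv_shift_fold (ds : List Int) :
    ∀ (t p : Int), ds.foldl pvStep (t, p)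
      = (t + (ds.foldl pvStep (0, p)).1, (ds.foldl pvStep (0, p)).2) := by
  induction ds with
  | nil => intro t p; simp
  | cons d ds ih =>
    intro t p
    simp only [List.foldl_cons, pvStep]
    rw [ih, ih (0 + _)]
    simp [add_assoc]

theorem pv_noclamp (ds : List Int) :
    ∀ (t p : Int), (∀ q, q ≠ [] → q <+: ds → 0 ≤ p + q.sum) →
      ds.foldl pvStep (t, p) = (t + pvE p ds, p + ds.sum) := by
  induction ds with
  | nil => intro t p _; simp [pvE]
  | cons d ds ih =>
    intro t p hp
    have h1 : 0 ≤ p + d := by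
      have := hp [d] (by simp) ⟨ds, rfl⟩
      simpa using this
    simp only [List.foldl_cons, pvStep, if_neg (by omega : ¬ p + d < 0)]
    rw [ih (t + (p + d)) (p + d) (fun q hq hpre => by
      have := hp (d :: q) (by simp) (by
        rcases hpre with ⟨r, hr⟩
        exact ⟨r, by simp [hr]⟩)
      simpa [add_assoc] using this)]
    simp [pvE, add_assoc]

theorem pvE_add (ds : List Int) : ∀ (a b : Int), pvE (a + b) ds = pvE a ds + ds.length * b := by
  induction ds with
  | nil => intro a b; simp [pvE]
  | cons d ds ih =>
    intro a b
    have h : a + b + d = (a + d) + b := by ring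
    simp only [pvE, h, ih (a + d) b, List.length_cons]
    push_cast
    ring

theorem pv_periods_closed (ds : List Int) (hnet : 0 ≤ ds.sum) :
    ∀ (m : Nat) (t p : Int), (∀ q, q ≠ [] → q <+: ds → 0 ≤ p + q.sum) →
      (List.replicate m ds).flatten.foldl pvStep (t, p)
        = (t + m * ((ds.length : Int) * p + pvE 0 ds) + (ds.length : Int) * ds.sum * pvTri m,
           p + m * ds.sum) := by
  intro m
  induction m with
  | zero => intro t p _; simp [pvTri]
  | succ m ih =>
    intro t p hp
    rw [List.replicate_succ, List.flatten_cons, List.foldl_append, pv_noclamp ds t p hp]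
    rw [ih (t + pvE p ds) (p + ds.sum) (fun q hq hpre => by
      have := hp q hq hpre
      omega)]
    have he : pvE p ds = pvE 0 ds + (ds.length : Int) * p := by
      have := pvE_add ds 0 p
      simpa using this
    rw [Prod.mk.injEq]
    refine ⟨?_, by push_cast; ring⟩
    rw [he]
    simp only [pvTri]
    push_cast
    ring

theorem pv_periods_fixed (ds : List Int) (p : Int)
    (hfix : (ds.foldl pvStep (0, p)).2 = p) :
    ∀ (m : Nat) (t : Int),
      (List.replicate m ds).flatten.foldl pvStep (t, p)
        = (t + m * (ds.foldl pvStep (0, p)).1, p) := by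
  intro m
  induction m with
  | zero => intro t; simp
  | succ m ih =>
    intro t
    rw [List.replicate_succ, List.flatten_cons, List.foldl_append, pv_shift_fold ds t p, hfix, ih]
    rw [Prod.mk.injEq]
    refine ⟨by push_cast; ring, rfl⟩

theorem pvTri_two_mul (m : Nat) : 2 * pvTri m = (m : Int) * ((m : Int) - 1) := by
  induction m with
  | zero => simp [pvTri]
  | succ m ih =>
    simp only [pvTri]
    rw [show (2 : Int) * (pvTri m + (m : Int)) = 2 * pvTri m + 2 * (m : Int) by ring, ih]
    push_cast
    ring

theorem pvTri_eq (m : Nat) : pvTri m = PySem.Int.floordiv ((m : Int) * ((m : Int) - 1)) 2 := by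
  rw [PySem.Int.floordiv_eq_ediv_of_pos (by norm_num), ← pvTri_two_mul m,
    Int.mul_ediv_cancel_left _ (by norm_num)]

-- characterisation of Source B's (net, K, minpref) fold
theorem pvTrip_net (ds : List Int) : ∀ (s K m : Int), (ds.foldl pvTrip (s, K, m)).1 = s + ds.sum := by
  induction ds with
  | nil => intro s K m; simp
  | cons d ds ih =>
    intro s K m
    simp only [List.foldl_cons, pvTrip]
    rw [ih]
    simp [List.sum_cons]
    ring

theorem pvTrip_K (ds : List Int) : ∀ (s K m : Int), (ds.foldl pvTrip (s, K, m)).2.1 = K + pvE s ds := by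
  induction ds with
  | nil => intro s K m; simp [pvE]
  | cons d ds ih =>
    intro s K m
    simp only [List.foldl_cons, pvTrip]
    rw [ih]
    simp [pvE]
    ring

theorem pvTrip_min (ds : List Int) :
    ∀ (s K m : Int), (ds.foldl pvTrip (s, K, m)).2.2 ≤ m ∧
      (∀ q, q ≠ [] → q <+: ds → (ds.foldl pvTrip (s, K, m)).2.2 ≤ s + q.sum) := by
  induction ds with
  | nil =>
    intro s K m
    refine ⟨le_refl _, fun q hq hpre => absurd (List.prefix_nil.mp hpre) hq⟩
  | cons d ds ih =>
    intro s K m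
    simp only [List.foldl_cons, pvTrip]
    obtain ⟨h1, h2⟩ := ih (s + d) (K + (s + d)) (if s + d < m then s + d else m)
    have hmin : (if s + d < m then s + d else m) ≤ m := by split <;> omega
    have hminsd : (if s + d < m then s + d else m) ≤ s + d := by split <;> omega
    refine ⟨le_trans h1 hmin, fun q hq hpre => ?_⟩
    rcases q with _ | ⟨x, q'⟩
    · exact absurd rfl hq
    · obtain ⟨hx, hq'⟩ := List.cons_prefix_cons.mp hpre
      subst hx
      rcases q' with _ | ⟨y, q''⟩
      · simpa using le_trans h1 hminsd
      · have := h2 (y :: q'') (by simp) hq'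
        simp only [List.sum_cons] at this ⊢
        omega

-- the pvLoop = m identical periods correspondence
theorem pvLoop_eq (ds : List Int) (L net K minpref : Int)
    (hnet : net = ds.sum) (hK : K = pvE 0 ds) (hL : L = (ds.length : Int))
    (hmin : ∀ q, q ≠ [] → q <+: ds → minpref ≤ q.sum) :
    ∀ (N : Nat) (remaining t p : Int), remaining.toNat = N →
      pvLoop ds L net K minpref remaining t p
        = (List.replicate remaining.toNat ds).flatten.foldl pvStep (t, p) := by
  subst hnet hK hL
  intro N
  induction N using Nat.strong_induction_on with
  | _ N ihN =>
    intro remaining t p hN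
    rw [pvLoop]
    by_cases hpos : 0 < remaining
    · rw [dif_pos hpos]
      obtain ⟨m, hm⟩ : ∃ m : Nat, remaining = (m : Int) := ⟨remaining.toNat, (Int.toNat_of_nonneg hpos.le).symm⟩
      subst hm
      simp only [Int.toNat_natCast] at hN ⊢
      by_cases hcf : 0 ≤ p + minpref ∧ 0 ≤ ds.sum
      · rw [if_pos hcf]
        rw [pv_periods_closed ds hcf.2 m t p
          (fun q hq hpre => by have := hmin q hq hpre; omega)]
        rw [pvTri_eq m]
        rw [Prod.mk.injEq]
        exact ⟨by ring, by ring⟩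
      · rw [if_neg hcf]
        have hrun : pvPeriodRun ds p = ds.foldl pvStep (0, p) := rfl
        by_cases hfix : (pvPeriodRun ds p).2 = p
        · rw [if_pos hfix]
          rw [pv_periods_fixed ds p (hrun ▸ hfix) m t]
          rw [Prod.mk.injEq]
          exact ⟨by rw [hrun], by rw [hrun] at hfix; exact hfix⟩
        · rw [if_neg hfix]
          have hmpos : 0 < m := by omega
          have htn : ((m : Int) - 1).toNat = m - 1 := by omega
          have hlt : ((m : Int) - 1).toNat < N := by omega
          rw [ihN _ hlt ((m : Int) - 1) _ _ rfl, htn]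
          rw [show m = (m - 1) + 1 by omega, List.replicate_succ, List.flatten_cons,
            List.foldl_append, pv_shift_fold ds t p, hrun]
          simp
    · rw [dif_neg hpos]
      have : remaining.toNat = 0 := by omega
      simp [this]

theorem pv_shift (f : Nat → Int) (LN : Nat) (hper : ∀ k, f (k + LN) = f k) :
    ∀ a k, f (a * LN + k) = f k := by
  intro a
  induction a with
  | zero => intro k; simp
  | succ a ih =>
    intro k
    have h : (a + 1) * LN + k = a * LN + (k + LN) := by ring
    rw [h, ih, hper]

theorem pv_range_map_add (f : Nat → Int) (LN : Nat) (hper : ∀ k, f (k + LN) = f k)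
    (a r : Nat) :
    (List.range (a * LN + r)).map f
      = (List.range (a * LN)).map f ++ (List.range r).map f := by
  rw [List.range_add, List.map_append, List.map_map]
  congr 1
  refine List.map_congr_left (fun j _ => ?_)
  exact pv_shift f LN hper a j

theorem pv_range_map_chunks (f : Nat → Int) (LN : Nat) (hper : ∀ k, f (k + LN) = f k) :
    ∀ a : Nat,
      (List.range (a * LN)).map f = (List.replicate a ((List.range LN).map f)).flatten := by
  intro a
  induction a with
  | zero => simp
  | succ a ih =>
    have h : (a + 1) * LN = a * LN + LN := by ring
    rw [h, pv_range_map_add f LN hper, ih, List.replicate_succ', List.flatten_append]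
    simp

theorem pv_fused (h : Nat → Int) (N : Nat) (init : Int × Int) :
    (List.range N).foldl (fun st k => pvStep st (h k)) init
      = ((List.range N).map h).foldl pvStep init :=
  by rw [List.foldl_map]

-- the whole equation, over the two character lists (applied by `exact`, avoiding any rewriting
-- against the large goal)
theorem pvMain (R S : List Char) (rounds : Int)
    (hRpos : 0 < R.length) (hSpos : 0 < S.length)
    (hle : 0 < rounds * (R.length : Int)) :
    ((PySem.List.pyRange 0 (rounds * (R.length : Int)) 1).foldl
        (fun st i => pvStep st (pvDI R S (R.length : Int) (S.length : Int) i))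
        ((0 : Int), (10 : Int))).1
    = ((PySem.List.slice
          ((PySem.List.pyRange 0
              ((((PySem.List.pyRange 1 ((S.length : Int) + 1) 1).find?
                  (fun k => PySem.Int.mod ((R.length : Int) * k) (S.length : Int) == 0)).map
                    (fun k => (R.length : Int) * k)).getD ((R.length : Int) * (S.length : Int))) 1).foldl
            (fun (acc : List Int) i =>
              acc ++ [if PySem.List.pyGetD R (PySem.Int.mod i (R.length : Int)) ' ' = '+' then 1
                      else if PySem.List.pyGetD R (PySem.Int.mod i (R.length : Int)) ' ' = '-' then -1
                      else if PySem.List.pyGetD S (PySem.Int.mod i (S.length : Int)) ' ' = '+' then 1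
                      else if PySem.List.pyGetD S (PySem.Int.mod i (S.length : Int)) ' ' = '-' then (-1 : Int)
                      else 0]) [])
          none
          (some (PySem.Int.mod (rounds * (R.length : Int))
            ((((PySem.List.pyRange 1 ((S.length : Int) + 1) 1).find?
                (fun k => PySem.Int.mod ((R.length : Int) * k) (S.length : Int) == 0)).map
                  (fun k => (R.length : Int) * k)).getD ((R.length : Int) * (S.length : Int)))))).foldl
        pvStep
        (pvLoop
          ((PySem.List.pyRange 0
              ((((PySem.List.pyRange 1 ((S.length : Int) + 1) 1).find?
                  (fun k => PySem.Int.mod ((R.length : Int) * k) (S.length : Int) == 0)).map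
                    (fun k => (R.length : Int) * k)).getD ((R.length : Int) * (S.length : Int))) 1).foldl
            (fun (acc : List Int) i =>
              acc ++ [if PySem.List.pyGetD R (PySem.Int.mod i (R.length : Int)) ' ' = '+' then 1
                      else if PySem.List.pyGetD R (PySem.Int.mod i (R.length : Int)) ' ' = '-' then -1
                      else if PySem.List.pyGetD S (PySem.Int.mod i (S.length : Int)) ' ' = '+' then 1
                      else if PySem.List.pyGetD S (PySem.Int.mod i (S.length : Int)) ' ' = '-' then (-1 : Int)
                      else 0]) [])
          ((((PySem.List.pyRange 1 ((S.length : Int) + 1) 1).find?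
              (fun k => PySem.Int.mod ((R.length : Int) * k) (S.length : Int) == 0)).map
                (fun k => (R.length : Int) * k)).getD ((R.length : Int) * (S.length : Int)))
          (((PySem.List.pyRange 0
              ((((PySem.List.pyRange 1 ((S.length : Int) + 1) 1).find?
                  (fun k => PySem.Int.mod ((R.length : Int) * k) (S.length : Int) == 0)).map
                    (fun k => (R.length : Int) * k)).getD ((R.length : Int) * (S.length : Int))) 1).foldl
            (fun (acc : List Int) i =>
              acc ++ [if PySem.List.pyGetD R (PySem.Int.mod i (R.length : Int)) ' ' = '+' then 1
                      else if PySem.List.pyGetD R (PySem.Int.mod i (R.length : Int)) ' ' = '-' then -1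
                      else if PySem.List.pyGetD S (PySem.Int.mod i (S.length : Int)) ' ' = '+' then 1
                      else if PySem.List.pyGetD S (PySem.Int.mod i (S.length : Int)) ' ' = '-' then (-1 : Int)
                      else 0]) []).foldl pvTrip ((0 : Int), (0 : Int), (0 : Int))).1
          (((PySem.List.pyRange 0
              ((((PySem.List.pyRange 1 ((S.length : Int) + 1) 1).find?
                  (fun k => PySem.Int.mod ((R.length : Int) * k) (S.length : Int) == 0)).map
                    (fun k => (R.length : Int) * k)).getD ((R.length : Int) * (S.length : Int))) 1).foldl
            (fun (acc : List Int) i =>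
              acc ++ [if PySem.List.pyGetD R (PySem.Int.mod i (R.length : Int)) ' ' = '+' then 1
                      else if PySem.List.pyGetD R (PySem.Int.mod i (R.length : Int)) ' ' = '-' then -1
                      else if PySem.List.pyGetD S (PySem.Int.mod i (S.length : Int)) ' ' = '+' then 1
                      else if PySem.List.pyGetD S (PySem.Int.mod i (S.length : Int)) ' ' = '-' then (-1 : Int)
                      else 0]) []).foldl pvTrip ((0 : Int), (0 : Int), (0 : Int))).2.1
          (((PySem.List.pyRange 0
              ((((PySem.List.pyRange 1 ((S.length : Int) + 1) 1).find?
                  (fun k => PySem.Int.mod ((R.length : Int) * k) (S.length : Int) == 0)).map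
                    (fun k => (R.length : Int) * k)).getD ((R.length : Int) * (S.length : Int))) 1).foldl
            (fun (acc : List Int) i =>
              acc ++ [if PySem.List.pyGetD R (PySem.Int.mod i (R.length : Int)) ' ' = '+' then 1
                      else if PySem.List.pyGetD R (PySem.Int.mod i (R.length : Int)) ' ' = '-' then -1
                      else if PySem.List.pyGetD S (PySem.Int.mod i (S.length : Int)) ' ' = '+' then 1
                      else if PySem.List.pyGetD S (PySem.Int.mod i (S.length : Int)) ' ' = '-' then (-1 : Int)
                      else 0]) []).foldl pvTrip ((0 : Int), (0 : Int), (0 : Int))).2.2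
          (PySem.Int.floordiv (rounds * (R.length : Int))
            ((((PySem.List.pyRange 1 ((S.length : Int) + 1) 1).find?
                (fun k => PySem.Int.mod ((R.length : Int) * k) (S.length : Int) == 0)).map
                  (fun k => (R.length : Int) * k)).getD ((R.length : Int) * (S.length : Int))))
          0 10)).1 := by
    -- the common period L and its divisibility facts
    set L : Int := (((PySem.List.pyRange 1 ((S.length : Int) + 1) 1).find?
        (fun k => PySem.Int.mod ((R.length : Int) * k) (S.length : Int) == 0)).map
          (fun k => (R.length : Int) * k)).getD ((R.length : Int) * (S.length : Int)) with hLdef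
    have hLfacts : 0 < L ∧ (R.length : Int) ∣ L ∧ (S.length : Int) ∣ L := by
      rcases hf : (PySem.List.pyRange 1 ((S.length : Int) + 1) 1).find?
          (fun k => PySem.Int.mod ((R.length : Int) * k) (S.length : Int) == 0) with _ | k
      · rw [hLdef, hf]
        simp only [Option.map_none, Option.getD_none]
        exact ⟨mul_pos (by exact_mod_cast hRpos) (by exact_mod_cast hSpos),
          dvd_mul_right _ _, dvd_mul_left _ _⟩
      · have hpk := List.find?_some hf
        have hkmem := List.mem_of_find?_eq_some hf
        rw [PySem.List.mem_pyRange_one] at hkmem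
        simp only [beq_iff_eq] at hpk
        have hdvd : (S.length : Int) ∣ (R.length : Int) * k :=
          (PySem.Int.mod_eq_zero_iff_dvd _ _).mp hpk
        rw [hLdef, hf]
        simp only [Option.map_some, Option.getD_some]
        exact ⟨mul_pos (by exact_mod_cast hRpos) (by linarith [hkmem.1]),
          dvd_mul_right _ _, hdvd⟩
    obtain ⟨hLpos, hRdvd, hSdvd⟩ := hLfacts
    have hLcast : (L.toNat : Int) = L := Int.toNat_of_nonneg hLpos.le
    have hRdvdN : R.length ∣ L.toNat := by
      have : (R.length : Int) ∣ (L.toNat : Int) := hLcast ▸ hRdvd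
      exact_mod_cast this
    have hSdvdN : S.length ∣ L.toNat := by
      have : (S.length : Int) ∣ (L.toNat : Int) := hLcast ▸ hSdvd
      exact_mod_cast this
    -- floordiv / mod facts
    have hfull0 : 0 ≤ PySem.Int.floordiv (rounds * (R.length : Int)) L :=
      (PySem.Int.le_floordiv_iff_mul_le hLpos).mpr (by linarith)
    have hrem0 : 0 ≤ PySem.Int.mod (rounds * (R.length : Int)) L :=
      PySem.Int.mod_nonneg _ hLpos
    have hremlt : PySem.Int.mod (rounds * (R.length : Int)) L < L :=
      PySem.Int.mod_lt _ hLpos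
    have hsum : PySem.Int.floordiv (rounds * (R.length : Int)) L * L
        + PySem.Int.mod (rounds * (R.length : Int)) L = rounds * (R.length : Int) :=
      PySem.Int.floordiv_mul_add_mod _ _
    have hNsum : (rounds * (R.length : Int)).toNat
        = (PySem.Int.floordiv (rounds * (R.length : Int)) L).toNat * L.toNat
          + (PySem.Int.mod (rounds * (R.length : Int)) L).toNat := by
      have hcast : (((PySem.Int.floordiv (rounds * (R.length : Int)) L).toNat * L.toNat
          + (PySem.Int.mod (rounds * (R.length : Int)) L).toNat : Nat) : Int)
          = rounds * (R.length : Int) := by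
        push_cast [Int.toNat_of_nonneg hfull0, Int.toNat_of_nonneg hLpos.le,
          Int.toNat_of_nonneg hrem0]
        linarith
      conv_lhs => rw [← hcast]
      rw [Int.toNat_natCast]
    have hrNle : (PySem.Int.mod (rounds * (R.length : Int)) L).toNat ≤ L.toNat := by omega
    -- periodicity of the per-index delta
    have hper : ∀ k : Nat,
        pvDI R S (R.length : Int) (S.length : Int) ((k + L.toNat : Nat) : Int)
          = pvDI R S (R.length : Int) (S.length : Int) (k : Int) := by
      intro k
      obtain ⟨t, ht⟩ := hRdvdN
      obtain ⟨u, hu⟩ := hSdvdN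
      have h1 : (k + L.toNat) % R.length = k % R.length := by
        rw [ht, Nat.add_mul_mod_self_left]
      have h2 : (k + L.toNat) % S.length = k % S.length := by
        rw [hu, Nat.add_mul_mod_self_left]
      simp only [pvDI, PySem.Int.mod_natCast, h1, h2]
    -- B's deltas list is the per-index delta table of one period
    have hdeltas :
        (PySem.List.pyRange 0 L 1).foldl
          (fun (acc : List Int) i =>
            acc ++ [if PySem.List.pyGetD R (PySem.Int.mod i (R.length : Int)) ' ' = '+' then 1
                    else if PySem.List.pyGetD R (PySem.Int.mod i (R.length : Int)) ' ' = '-' then -1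
                    else if PySem.List.pyGetD S (PySem.Int.mod i (S.length : Int)) ' ' = '+' then 1
                    else if PySem.List.pyGetD S (PySem.Int.mod i (S.length : Int)) ' ' = '-' then (-1 : Int)
                    else 0]) []
          = (List.range L.toNat).map
              (fun k : Nat => pvDI R S (R.length : Int) (S.length : Int) ((k : Nat) : Int)) := by
      rw [PySem.List.foldl_append_singleton_eq_map]
      rw [PySem.List.pyRange_one 0 L]
      rw [List.map_map]
      simp only [sub_zero, List.nil_append]
      refine List.map_congr_left (fun k _ => ?_)
      simp [pvDI, pvDelta]
    rw [hdeltas]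
    set f : Nat → Int := fun k : Nat => pvDI R S (R.length : Int) (S.length : Int) ((k : Nat) : Int) with hfdef
    set DL : List Int := (List.range L.toNat).map f with hDLdef
    have hmin : ∀ q, q ≠ [] → q <+: DL → (DL.foldl pvTrip (0, 0, 0)).2.2 ≤ q.sum := by
      intro q hq hpre
      have := (pvTrip_min DL 0 0 0).2 q hq hpre
      simpa using this
    have hLlen : L = ((DL.length : Nat) : Int) := by
      rw [hDLdef, List.length_map, List.length_range, hLcast]
    -- the while loop is full.toNat full periods
    have hloop :
        pvLoop DL L (DL.foldl pvTrip (0, 0, 0)).1 (DL.foldl pvTrip (0, 0, 0)).2.1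
            (DL.foldl pvTrip (0, 0, 0)).2.2
            (PySem.Int.floordiv (rounds * (R.length : Int)) L) 0 10
          = (List.replicate (PySem.Int.floordiv (rounds * (R.length : Int)) L).toNat DL).flatten.foldl
              pvStep (0, 10) := by
      rw [pvLoop_eq DL L _ _ _ (by simpa using pvTrip_net DL 0 0 0)
        (by simpa using pvTrip_K DL 0 0 0) hLlen hmin
        (PySem.Int.floordiv (rounds * (R.length : Int)) L).toNat _ 0 10 rfl]
    -- A's full run, chunked into full periods plus the remainder
    have hA :
        (PySem.List.pyRange 0 (rounds * (R.length : Int)) 1).foldl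
            (fun st i => pvStep st (pvDI R S (R.length : Int) (S.length : Int) i)) ((0:Int), (10:Int))
          = ((List.replicate (PySem.Int.floordiv (rounds * (R.length : Int)) L).toNat DL).flatten
              ++ List.take (PySem.Int.mod (rounds * (R.length : Int)) L).toNat DL).foldl
              pvStep (0, 10) := by
      rw [PySem.List.pyRange_one 0 (rounds * (R.length : Int))]
      simp only [sub_zero, zero_add]
      rw [List.foldl_map]
      rw [pv_fused f]
      rw [hNsum, pv_range_map_add f L.toNat hper, pv_range_map_chunks f L.toNat hper]
      rw [List.foldl_append, List.foldl_append]
      congr 1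
      rw [hDLdef, ← List.map_take, List.take_range, Nat.min_eq_left hrNle]
    rw [hloop]
    rw [PySem.List.slice_to _ hrem0]
    rw [hA, List.foldl_append]

-- ===== VERDICT (by name: the statement is the Claim_ definition above) =====
theorem get_total_essence_spec : Claim_equal_get_total_essence := by
  intro name sequence racetrack rounds hDom hPre
  unfold Spec_get_total_essence
  rw [pvA_eq]
  simp only [get_total_essence_alt, PySem.Str.len_eq]
  by_cases hle : rounds * ((racetrack.toList.length : Nat) : Int) ≤ 0
  · rw [if_pos hle, PySem.List.pyRange_one_eq_nil hle]
    simp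
  · rw [if_neg hle]
    push Not at hle
    have hRpos : 0 < racetrack.toList.length := by
      rcases Nat.eq_zero_or_pos racetrack.toList.length with h | h
      · rw [h] at hle; simp at hle
      · exact h
    have hrounds : 0 < rounds := by
      by_contra h
      push Not at h
      have : rounds * ((racetrack.toList.length : Nat) : Int) ≤ 0 :=
        mul_nonpos_of_nonpos_of_nonneg h (by positivity)
      omega
    have hSpos : 0 < sequence.toList.length := by
      rcases hPre with h | h | h
      · have hne : sequence.toList ≠ [] :=
          fun hh => h (String.toList_eq_nil_iff.mp hh)
        exact List.length_pos_of_ne_nil hne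
      · omega
      · exfalso
        rw [h] at hRpos
        simp at hRpos
    exact pvMain racetrack.toList sequence.toList rounds hRpos hSpos hle
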